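-- pv_equiv track=rewrite | github.com/ldmtecknoit-lab/frameworkkk | src/framework/service/diagnostic.py | correlate_failure
-- ===== SOURCE A (Python) =====
-- from typing import Dict, Any, List, Optional, Set
--
-- def correlate_failure(failing_test_name: str, dependency_map: Dict[str, set[str]]):
--     """Identifica la funzione pubblica interessata dal fallimento del test."""
--     if failing_test_name.startswith('test_'):
--         target_fn_name = failing_test_name.replace('test_', '')
--
--         inverted_map: Dict[str, set[str]] = {}
--         for caller, callees in dependency_map.items():
--             for callee in callees:
--                 inverted_map.setdefault(callee, set()).add(caller)
--
--         affected_public_functions = inverted_map.get(target_fn_name, set())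
--
--         if affected_public_functions:
--             return affected_public_functions
--         elif target_fn_name in dependency_map:
--             return {target_fn_name}
--
--     return set()
-- ===== SOURCE B (Python) =====
-- def correlate_failure(failing_test_name, dependency_map):
--     """Identifica la funzione pubblica interessata dal fallimento del test."""
--     if not failing_test_name.startswith('test_'):
--         return set()
--     target_fn_name = failing_test_name.replace('test_', '')
--     callers = set()
--     target_defined = False
--     for caller, callees in dependency_map.items():
--         if target_fn_name in callees:
--             callers.add(caller)
--         if caller == target_fn_name:
--             target_defined = True
--     if callers:
--         return callers
--     if target_defined:
--         return {target_fn_name}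
--     return set()
-- ===== Notes on version B (the rewrite author's own statement) =====
-- stated objective: simpler
-- what changed: Replaces A's construction of the full inverted callee->callers index plus a separate membership test of the target in the dict by one fused single pass with an early-return guard: it simultaneously accumulates the target's callers and a flag recording whether the target itself is a key, then picks the result from that pair.
import Mathlib
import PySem

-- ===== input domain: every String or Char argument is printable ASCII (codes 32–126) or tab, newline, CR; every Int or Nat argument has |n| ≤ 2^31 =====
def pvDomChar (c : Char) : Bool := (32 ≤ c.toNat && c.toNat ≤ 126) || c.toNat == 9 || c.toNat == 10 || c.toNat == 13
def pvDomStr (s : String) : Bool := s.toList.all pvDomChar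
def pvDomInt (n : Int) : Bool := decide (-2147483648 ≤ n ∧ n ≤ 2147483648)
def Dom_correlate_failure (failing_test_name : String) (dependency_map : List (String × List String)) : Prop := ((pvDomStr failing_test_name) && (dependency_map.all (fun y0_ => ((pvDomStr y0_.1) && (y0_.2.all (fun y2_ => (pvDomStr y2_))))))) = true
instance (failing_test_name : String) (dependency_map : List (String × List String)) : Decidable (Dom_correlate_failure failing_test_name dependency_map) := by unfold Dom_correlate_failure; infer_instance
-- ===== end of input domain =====

-- B replaces A's full inverted callee→callers index (plus a separate key-membership test) by one
-- fused single pass accumulating the target's callers and a target-is-a-key flag; return-value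
-- equivalence is proved (neither version mutates its arguments). Objective: simpler.

-- ===== PORT A =====
-- literal transliteration of A: build inverted_map (dict of sets) with the nested loop, then the three return paths
def correlate_failure (failing_test_name : String) (dependency_map : List (String × List String)) : List String :=
  if PySem.Str.startswith failing_test_name "test_" then
    let target_fn_name := PySem.Str.replace failing_test_name "test_" ""
    let inverted_map : PySem.Dict String (PySem.Set String) :=
      dependency_map.foldl
        (fun m p =>
          -- for callee in callees: inverted_map.setdefault(callee, set()).add(caller)
          p.2.foldl (fun m callee => m.modify callee PySem.Set.empty (fun s => PySem.Set.add s p.1)) m)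
        PySem.Dict.empty
    let affected_public_functions := inverted_map.getD target_fn_name PySem.Set.empty
    if affected_public_functions ≠ [] then
      affected_public_functions
    else if dependency_map.any (fun p => p.1 == target_fn_name) then
      [target_fn_name]
    else []
  else []

-- ===== PORT B =====
-- early-return guard, then ONE fused pass: pair state (callers so far, target seen as key?)
def correlate_failure_alt (failing_test_name : String) (dependency_map : List (String × List String)) : List String :=
  if ¬ PySem.Str.startswith failing_test_name "test_" then []
  else
    let target_fn_name := PySem.Str.replace failing_test_name "test_" ""
    let st : PySem.Set String × Bool :=
      dependency_map.foldl
        (fun st p =>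
          (if p.2.contains target_fn_name then PySem.Set.add st.1 p.1 else st.1,
           st.2 || (p.1 == target_fn_name)))
        (PySem.Set.empty, false)
    if st.1 ≠ [] then st.1
    else if st.2 then [target_fn_name]
    else []

-- ===== PRECONDITION & SPEC =====
def Spec_correlate_failure (failing_test_name : String) (dependency_map : List (String × List String)) (out : List String) : Prop := out = correlate_failure_alt failing_test_name dependency_map
instance (failing_test_name : String) (dependency_map : List (String × List String)) (out : List String) : Decidable (Spec_correlate_failure failing_test_name dependency_map out) := by unfold Spec_correlate_failure; infer_instance

-- ===== CLAIM =====
def Claim_equal_correlate_failure : Prop := ∀ (failing_test_name : String) (dependency_map : List (String × List String)), Dom_correlate_failure failing_test_name dependency_map → Spec_correlate_failure failing_test_name dependency_map (correlate_failure failing_test_name dependency_map)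

-- ===== LEMMAS AND PROOFS =====

-- inner loop of A: after processing one caller's callee list, the target's entry gained that
-- caller exactly when the list contains the target
lemma inner_getD (caller t : String) (cs : List String) (m : PySem.Dict String (PySem.Set String)) :
    (cs.foldl (fun m callee => m.modify callee PySem.Set.empty (fun s => PySem.Set.add s caller)) m).getD t PySem.Set.empty
      = if cs.contains t then PySem.Set.add (m.getD t PySem.Set.empty) caller
        else m.getD t PySem.Set.empty := by
  induction cs generalizing m with
  | nil => simp
  | cons c rest ih =>
      simp only [List.foldl_cons, ih, PySem.Dict.getD_modify, List.contains_cons]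
      by_cases hct : t = c
      · subst hct
        simp only [BEq.rfl, Bool.true_or, if_pos]
        split
        · exact PySem.Set.add_of_mem (by simp [PySem.Set.mem_add])
        · rfl
      · simp [hct]

-- outer loop of A: the target's entry in the inverted map is the callers of the target, deduped
lemma outer_getD (t : String) (dm : List (String × List String)) (m : PySem.Dict String (PySem.Set String)) :
    (dm.foldl
        (fun m p => p.2.foldl (fun m callee => m.modify callee PySem.Set.empty (fun s => PySem.Set.add s p.1)) m)
        m).getD t PySem.Set.empty
      = PySem.Set.update (m.getD t PySem.Set.empty)
          ((dm.filter (fun p => p.2.contains t)).map Prod.fst) := by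
  induction dm generalizing m with
  | nil => simp [PySem.Set.update]
  | cons p rest ih =>
      simp only [List.foldl_cons, ih, List.filter_cons, inner_getD]
      by_cases h : t ∈ p.2
      · simp [h, PySem.Set.update_cons]
      · simp [h]

-- B's fused pass computes (deduped callers of the target added to s, flag ∨ target-is-a-key)
lemma alt_fold (t : String) (dm : List (String × List String)) (s : PySem.Set String) (b : Bool) :
    dm.foldl
        (fun st p => (if p.2.contains t then PySem.Set.add st.1 p.1 else st.1, st.2 || (p.1 == t)))
        (s, b)
      = (PySem.Set.update s ((dm.filter (fun p => p.2.contains t)).map Prod.fst),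
         b || dm.any (fun p => p.1 == t)) := by
  induction dm generalizing s b with
  | nil => simp [PySem.Set.update]
  | cons p rest ih =>
      rw [List.foldl_cons, ih, List.filter_cons, List.any_cons]
      by_cases h : p.2.contains t
      · rw [if_pos h, if_pos h, List.map_cons, PySem.Set.update_cons, Bool.or_assoc]
      · rw [if_neg h, if_neg h, Bool.or_assoc]

theorem correlate_failure_eq_alt (failing_test_name : String) (dependency_map : List (String × List String)) :
    correlate_failure failing_test_name dependency_map = correlate_failure_alt failing_test_name dependency_map := by
  unfold correlate_failure correlate_failure_alt
  by_cases h : PySem.Str.startswith failing_test_name "test_"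
  · simp only [h, if_pos, not_true, ite_not, if_false,
      outer_getD, PySem.Dict.getD_empty, alt_fold, Bool.false_or, PySem.Set.update_empty]
  · simp only [PySem.Str.startswith, show ("test_").toList = ['t','e','s','t','_'] from rfl,
      Bool.not_eq_true] at h
    simp [h]

-- ===== VERDICT =====
theorem correlate_failure_spec : Claim_equal_correlate_failure := by
  intro ftn dm _
  exact correlate_failure_eq_alt ftn dm
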